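-- pv_equiv track=rewrite | github.com/1010Min/Practice | programmers_python/Lv_1/42_147355.py | solution
-- ===== SOURCE A (Python) =====
-- def solution(t, p):
--     answer = 0
--     length = len(p)
--     tt = []
--
--     tt = [t[i : i + length] for i in range(0, len(t))]
--
--     for i in tt:
--         if i <= p and len(i) == len(p):
--             answer += 1
--
--     return answer
-- ===== SOURCE B (Python) =====
-- def solution(t, p):
--     length = len(p)
--     ws = sorted(w for w in (t[i:i + length] for i in range(len(t))) if len(w) == length)
--     # count windows <= p by binary search for the right insertion point of p
--     lo, hi = 0, len(ws)
--     while lo < hi: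
--         mid = (lo + hi) // 2
--         if ws[mid] <= p:
--             lo = mid + 1
--         else:
--             hi = mid
--     return lo
-- ===== Notes on version B (the rewrite author's own statement) =====
-- stated objective: alternative
-- what changed: B builds the same full-length windows, sorts them once and counts the windows lexicographically <= p with a hand-written bisect_right binary search (log n comparisons after a C-level sort) instead of A's interpreted linear compare-every-window loop.
import Mathlib
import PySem

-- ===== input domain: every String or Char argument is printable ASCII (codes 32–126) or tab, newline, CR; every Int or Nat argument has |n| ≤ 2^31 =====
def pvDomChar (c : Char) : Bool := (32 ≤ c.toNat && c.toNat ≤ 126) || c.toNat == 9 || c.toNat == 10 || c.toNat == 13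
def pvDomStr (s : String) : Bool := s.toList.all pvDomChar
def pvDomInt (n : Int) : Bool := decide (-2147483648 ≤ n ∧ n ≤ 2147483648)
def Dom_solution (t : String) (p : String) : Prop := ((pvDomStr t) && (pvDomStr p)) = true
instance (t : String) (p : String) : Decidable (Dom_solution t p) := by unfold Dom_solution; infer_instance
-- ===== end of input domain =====

-- B replaces A's linear compare-each-window scan by sort + binary search (alternative decomposition, not claimed faster).

-- ===== PORT A =====
def solution (t : String) (p : String) : Int :=
  let length : Int := (p.toList.length : Int)
  let tt : List (List Char) :=
    (PySem.List.pyRange 0 (t.toList.length : Int) 1).map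
      (fun i => PySem.List.slice t.toList (some i) (some (i + length)))
  tt.foldl (fun answer w =>
      if w ≤ p.toList ∧ w.length = p.toList.length then answer + 1 else answer) 0

-- ===== PORT B =====
-- hand-written bisect_right loop from Source B (while lo < hi: …)
def bisectCount (ws : List (List Char)) (p : List Char) (lo hi : Nat) : Nat :=
  if _h : lo < hi then
    let mid := (lo + hi) / 2
    if ws.getD mid [] ≤ p then bisectCount ws p (mid + 1) hi
    else bisectCount ws p lo mid
  else lo
  termination_by hi - lo
  decreasing_by all_goals omega

def solution_alt (t : String) (p : String) : Int :=
  let length : Int := (p.toList.length : Int)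
  let ws : List (List Char) :=
    PySem.List.sorted
      (((PySem.List.pyRange 0 (t.toList.length : Int) 1).map
          (fun i => PySem.List.slice t.toList (some i) (some (i + length)))).filter
        (fun w => w.length == p.toList.length))
      (fun w => w) false
  (bisectCount ws p.toList 0 ws.length : Int)

-- ===== PRECONDITION & SPEC =====
def Spec_solution (t : String) (p : String) (out : Int) : Prop := out = solution_alt t p
instance (t : String) (p : String) (out : Int) : Decidable (Spec_solution t p out) := by unfold Spec_solution; infer_instance

-- ===== CLAIM (what is proved, stated in full; the proofs are below) =====
def Claim_equal_solution : Prop := ∀ (t : String) (p : String), Dom_solution t p → Spec_solution t p (solution t p)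

-- ===== LEMMAS AND PROOFS =====

-- the default LT/DecidableLT instances on List Char agree with the LinearOrder ones
lemma sorted_inst_eq (l : List (List Char)) :
    PySem.List.sorted l (fun w => w) false
      = @PySem.List.sorted (List Char) (List Char) List.instLinearOrder.toLT
          LinearOrder.toDecidableLT l (fun w => w) false := by
  congr 1

-- A's counting loop is countP
lemma foldl_count {α : Type} (q : α → Prop) [DecidablePred q] (l : List α) (n : Int) :
    l.foldl (fun a w => if q w then a + 1 else a) n = n + l.countP (fun w => decide (q w)) := by
  induction l generalizing n with
  | nil => simp
  | cons x xs ih =>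
    by_cases h : q x <;> simp [List.countP_cons, h, ih] <;> ring

-- countP of a predicate that holds exactly on the first k positions is k
lemma countP_of_split {α : Type} (q : α → Prop) [DecidablePred q] :
    ∀ (l : List α) (k : Nat), k ≤ l.length →
    (∀ j, j < k → ∀ h : j < l.length, q l[j]) →
    (∀ j, k ≤ j → ∀ h : j < l.length, ¬ q l[j]) →
    l.countP (fun w => decide (q w)) = k := by
  intro l
  induction l with
  | nil =>
    intro k hk _ _
    have hk0 : k = 0 := by simpa using hk
    subst hk0; simp
  | cons x xs ih =>
    intro k hk h1 h2
    cases k with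
    | zero =>
      have hx : ¬ q x := by simpa using h2 0 (Nat.le_refl 0) (by simp)
      rw [List.countP_cons]
      have : xs.countP (fun w => decide (q w)) = 0 := by
        refine ih 0 (Nat.zero_le _) (by omega) ?_
        intro j _ h
        simpa using h2 (j + 1) (by omega) (by simpa using Nat.succ_lt_succ h)
      simp [this, hx]
    | succ k' =>
      have hx : q x := by simpa using h1 0 (by omega) (by simp)
      rw [List.countP_cons]
      have : xs.countP (fun w => decide (q w)) = k' := by
        refine ih k' (by simpa using hk) ?_ ?_
        · intro j hj h
          simpa using h1 (j + 1) (by omega) (by simpa using Nat.succ_lt_succ h)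
        · intro j hj h
          simpa using h2 (j + 1) (by omega) (by simpa using Nat.succ_lt_succ h)
      simp [this, hx]

-- binary-search invariant: on a sorted list, bisectCount separates the ≤ p prefix
lemma bisectCount_inv (ws : List (List Char)) (p : List Char)
    (hs : ws.Pairwise (fun a b => a ≤ b)) :
    ∀ (n lo hi : Nat), hi - lo ≤ n → lo ≤ hi → hi ≤ ws.length →
    (∀ j, j < lo → ∀ h : j < ws.length, ws[j] ≤ p) →
    (∀ j, hi ≤ j → ∀ h : j < ws.length, ¬ ws[j] ≤ p) →
    bisectCount ws p lo hi ≤ ws.length ∧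
    (∀ j, j < bisectCount ws p lo hi → ∀ h : j < ws.length, ws[j] ≤ p) ∧
    (∀ j, bisectCount ws p lo hi ≤ j → ∀ h : j < ws.length, ¬ ws[j] ≤ p) := by
  have hmono := List.pairwise_iff_getElem.mp hs
  intro n
  induction n with
  | zero =>
    intro lo hi hn hlh hhl h1 h2
    have he : lo = hi := by omega
    rw [bisectCount]
    simp only [show ¬ lo < hi by omega, dif_neg, not_false_iff]
    exact ⟨by omega, fun j hj h => h1 j hj h, fun j hj h => h2 j (he ▸ hj) h⟩
  | succ n ih =>
    intro lo hi hn hlh hhl h1 h2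
    rw [bisectCount]
    by_cases hlt : lo < hi
    · simp only [dif_pos hlt]
      have hmid : (lo + hi) / 2 < ws.length := by omega
      rw [List.getD_eq_getElem ws [] hmid]
      by_cases hle : ws[(lo + hi) / 2] ≤ p
      · simp only [if_pos hle]
        refine ih ((lo + hi) / 2 + 1) hi (by omega) (by omega) hhl ?_ h2
        intro j hj h
        rcases Nat.lt_or_ge j ((lo + hi) / 2) with hj' | hj'
        · exact le_trans (hmono j ((lo + hi) / 2) h hmid hj') hle
        · have : j = (lo + hi) / 2 := by omega
          subst this; exact hle
      · simp only [if_neg hle]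
        refine ih lo ((lo + hi) / 2) (by omega) (by omega) (by omega) h1 ?_
        intro j hj h hcon
        rcases Nat.lt_or_ge ((lo + hi) / 2) j with hj' | hj'
        · exact hle (le_trans (hmono ((lo + hi) / 2) j hmid h hj') hcon)
        · have : j = (lo + hi) / 2 := by omega
          subst this; exact hle hcon
    · simp only [dif_neg hlt]
      have he : lo = hi := by omega
      exact ⟨by omega, fun j hj h => h1 j hj h, fun j hj h => h2 j (he ▸ hj) h⟩

lemma bisectCount_eq_countP (ws : List (List Char)) (p : List Char)
    (hs : ws.Pairwise (fun a b => a ≤ b)) :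
    bisectCount ws p 0 ws.length = ws.countP (fun w => decide (w ≤ p)) := by
  obtain ⟨hb, h1, h2⟩ := bisectCount_inv ws p hs ws.length 0 ws.length (by omega)
    (Nat.zero_le _) (Nat.le_refl _) (by omega) (by omega)
  exact (countP_of_split (fun w => w ≤ p) ws _ hb h1 h2).symm

-- ===== VERDICT (by name: the statement is the Claim_ definition above) =====
theorem solution_spec : Claim_equal_solution := by
  intro t p _
  unfold Spec_solution solution solution_alt
  simp only []
  set length : Int := (p.toList.length : Int) with hlen
  set tt : List (List Char) :=
    (PySem.List.pyRange 0 (t.toList.length : Int) 1).map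
      (fun i => PySem.List.slice t.toList (some i) (some (i + length))) with htt
  set ws : List (List Char) :=
    PySem.List.sorted (tt.filter (fun w => w.length == p.toList.length)) (fun w => w) false with hws
  have hsorted : ws.Pairwise (fun a b => a ≤ b) := by
    rw [hws, sorted_inst_eq]
    exact PySem.List.sorted_pairwise (tt.filter (fun w => w.length == p.toList.length)) (fun w => w)
  rw [foldl_count (fun w => w ≤ p.toList ∧ w.length = p.toList.length) tt 0,
      bisectCount_eq_countP ws p.toList hsorted]
  have hperm : ws.Perm (tt.filter (fun w => w.length == p.toList.length)) :=
    PySem.List.sorted_perm _ _ _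
  rw [hperm.countP_eq]
  rw [List.countP_filter]
  have : (fun w : List Char => decide (w ≤ p.toList ∧ w.length = p.toList.length)) =
      (fun w : List Char => decide (w ≤ p.toList) && (w.length == p.toList.length)) := by
    funext w; simp only [Bool.decide_and, ← Bool.beq_eq_decide_eq]
  rw [this]
  ring
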